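-- pv_equiv track=rewrite | github.com/Ruturaj4/cfi_project | framework/ida_cfi/build_models.py | encodeFunction
-- ===== SOURCE A (Python) =====
-- def encodeFunction(param_list, return_t, encodePointers, encodeReturnType=True):
--     # Base encoding.
--     Encoding = 32
--     if len(param_list) < 8:
--         if encodeReturnType:
--             if encodePointers and return_t[0] == 11:
--                 Encoding = 16 + return_t[1]
--             else:
--                 Encoding = return_t[0]
--         for count, name, paratype in param_list:
--             if paratype[0] == 11:
--                 Encoding = 16 + paratype[1] + Encoding * 32
--             else:
--                 Encoding = paratype[0] + Encoding * 32
--     return Encoding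
-- ===== SOURCE B (Python) =====
-- def encodeFunction(param_list, return_t, encodePointers, encodeReturnType=True):
--     # Back-to-front recursion: combine params from the tail into a (value, weight)
--     # pair, then attach the leading digit by one multiplication.
--     if len(param_list) >= 8:
--         return 32
--     def rec(ps):
--         if not ps:
--             return 0, 1
--         _, _, t = ps[0]
--         v, w = rec(ps[1:])
--         d = 16 + t[1] if t[0] == 11 else t[0]
--         return d * w + v, w * 32
--     if not encodeReturnType:
--         acc = 32
--     elif encodePointers and return_t[0] == 11:
--         acc = 16 + return_t[1]
--     else:
--         acc = return_t[0]
--     v, w = rec(param_list)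
--     return acc * w + v
-- ===== Notes on version B (the rewrite author's own statement) =====
-- stated objective: alternative
-- what changed: A folds digits left-to-right with a running Horner accumulator (Encoding = digit + Encoding*32); B recurses over the parameter list from the back, returning a (value, weight) pair per suffix, and attaches the leading return-type digit with a single multiplication acc*weight+value.
import Mathlib
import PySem

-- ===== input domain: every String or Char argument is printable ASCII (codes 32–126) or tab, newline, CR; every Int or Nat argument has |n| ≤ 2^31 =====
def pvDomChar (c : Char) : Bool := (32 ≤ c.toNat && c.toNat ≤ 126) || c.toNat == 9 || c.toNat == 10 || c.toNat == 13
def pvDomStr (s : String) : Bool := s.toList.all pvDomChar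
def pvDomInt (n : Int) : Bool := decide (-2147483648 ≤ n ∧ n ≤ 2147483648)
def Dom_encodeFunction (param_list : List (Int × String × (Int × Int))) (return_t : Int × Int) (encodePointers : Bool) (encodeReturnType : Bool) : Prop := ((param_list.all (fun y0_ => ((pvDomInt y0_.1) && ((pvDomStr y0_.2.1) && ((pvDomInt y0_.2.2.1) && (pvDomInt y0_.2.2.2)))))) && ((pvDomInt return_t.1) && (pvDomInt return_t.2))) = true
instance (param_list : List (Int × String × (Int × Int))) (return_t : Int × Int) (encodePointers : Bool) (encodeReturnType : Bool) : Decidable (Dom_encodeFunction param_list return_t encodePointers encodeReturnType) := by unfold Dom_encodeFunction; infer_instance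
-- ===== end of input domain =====

-- B replaces A's left-to-right Horner fold with a back-to-front recursion building a (value, weight) pair, then attaches the leading digit once (alternative decomposition, same cost).
-- ===== PORT A =====
def encodeFunction (param_list : List (Int × String × (Int × Int))) (return_t : Int × Int) (encodePointers : Bool) (encodeReturnType : Bool) : Int :=
  if param_list.length < 8 then
    let enc0 : Int :=
      if encodeReturnType then
        if encodePointers && decide (return_t.1 = 11) then 16 + return_t.2 else return_t.1
      else 32
    param_list.foldl (fun enc p =>
      if p.2.2.1 = 11 then 16 + p.2.2.2 + enc * 32 else p.2.2.1 + enc * 32) enc0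
  else 32

-- ===== PORT B =====
-- back-to-front recursion over the suffix: returns (suffix value, 32^suffix length)
def pvRecB : List (Int × String × (Int × Int)) → Int × Int
  | [] => (0, 1)
  | p :: ps =>
      let vw := pvRecB ps
      let d : Int := if p.2.2.1 = 11 then 16 + p.2.2.2 else p.2.2.1
      (d * vw.2 + vw.1, vw.2 * 32)

def encodeFunction_alt (param_list : List (Int × String × (Int × Int))) (return_t : Int × Int) (encodePointers : Bool) (encodeReturnType : Bool) : Int :=
  if param_list.length ≥ 8 then 32
  else
    let acc : Int :=
      if !encodeReturnType then 32
      else if encodePointers && decide (return_t.1 = 11) then 16 + return_t.2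
      else return_t.1
    let vw := pvRecB param_list
    acc * vw.2 + vw.1

-- ===== PRECONDITION & SPEC =====
def Spec_encodeFunction (param_list : List (Int × String × (Int × Int))) (return_t : Int × Int) (encodePointers : Bool) (encodeReturnType : Bool) (out : Int) : Prop := out = encodeFunction_alt param_list return_t encodePointers encodeReturnType
instance (param_list : List (Int × String × (Int × Int))) (return_t : Int × Int) (encodePointers : Bool) (encodeReturnType : Bool) (out : Int) : Decidable (Spec_encodeFunction param_list return_t encodePointers encodeReturnType out) := by unfold Spec_encodeFunction; infer_instance

-- ===== CLAIM (what is proved, stated in full; the proofs are below) =====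
def Claim_equal_encodeFunction : Prop := ∀ (param_list : List (Int × String × (Int × Int))) (return_t : Int × Int) (encodePointers : Bool) (encodeReturnType : Bool), Dom_encodeFunction param_list return_t encodePointers encodeReturnType → Spec_encodeFunction param_list return_t encodePointers encodeReturnType (encodeFunction param_list return_t encodePointers encodeReturnType)

-- ===== LEMMAS AND PROOFS =====
theorem pvFoldA_eq_recB (pl : List (Int × String × (Int × Int))) : ∀ acc : Int,
    pl.foldl (fun enc p =>
        if p.2.2.1 = 11 then 16 + p.2.2.2 + enc * 32 else p.2.2.1 + enc * 32) acc
      = acc * (pvRecB pl).2 + (pvRecB pl).1 := by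
  induction pl with
  | nil => intro acc; simp [pvRecB]
  | cons p ps ih =>
    intro acc
    simp only [List.foldl_cons, pvRecB]
    rw [ih]
    split_ifs with h <;> ring

-- ===== VERDICT (by name: the statement is the Claim_ definition above) =====
theorem encodeFunction_spec : Claim_equal_encodeFunction := by
  intro pl rt ep er _
  unfold Spec_encodeFunction encodeFunction encodeFunction_alt
  by_cases h : pl.length < 8
  · rw [if_pos h, if_neg (show ¬ pl.length ≥ 8 by omega)]
    rw [pvFoldA_eq_recB]
    cases er <;> simp
  · rw [if_neg h, if_pos (by omega)]
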